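-- pv_equiv track=rewrite | github.com/dumbified/RMA-Camera-FA-Report-generator | FA report/failure_form_gui.py | _build_component_action_lines
-- ===== SOURCE A (Python) =====
-- def _build_component_action_lines(
--     e18: str, c20: str, ref_to_part: dict[str, tuple[str, str, str]]
-- ) -> str:
--     """
--     Build Action Taken lines from E18 (PCBA ATS component cause) and C20 (FT If fail, component change).
--     Format per line: {refs} {Description} {PartID}----->{count}
--     e.g. "F1 FUSE,SMD,SLOW-BLOW,2A,125V,OMNI-BLOK 2215-0026----->1"
--     Lookup is case-insensitive.
--     """
--     combined = f"{e18},{c20}".replace("\n", " ").replace("\r", " ")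
--     refs = [r.strip() for r in combined.split(",") if r.strip()]
--     if not refs or not ref_to_part:
--         return ""
--     # group by (part_id, desc) -> list of display_refs
--     group_key_to_refs: dict[tuple[str, str], list[str]] = {}
--     for ref in refs:
--         key = ref.lower()
--         if key in ref_to_part:
--             part_id, desc, display_ref = ref_to_part[key]
--             gk = (part_id, desc)
--             group_key_to_refs.setdefault(gk, []).append(display_ref)
--     if not group_key_to_refs:
--         return ""
--     lines = []
--     for (part_id, desc), ref_list in sorted(group_key_to_refs.items()):
--         ref_list_sorted = sorted(set(ref_list), key=lambda r: (r[0].upper(), len(r), r))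
--         refs_str = ", ".join(ref_list_sorted)
--         count = len(ref_list)
--         lines.append(f"- {refs_str} {desc} {part_id}----->{count}")
--     return "\n".join(lines)
-- ===== SOURCE B (Python) =====
-- def _build_component_action_lines(e18, c20, ref_to_part):
--     # One fused pass: parse tokens and look them up immediately; then sort the
--     # matched records by (part_id, desc) and emit one line per run (groupby-style).
--     matched = []
--     for tok in (e18 + "," + c20).replace("\n", " ").replace("\r", " ").split(","):
--         s = tok.strip()
--         if s:
--             hit = ref_to_part.get(s.lower())
--             if hit is not None:
--                 matched.append(hit)
--     if not matched:
--         return ""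
--     matched.sort(key=lambda t: (t[0], t[1]))
--     out = []
--     i = 0
--     n = len(matched)
--     while i < n:
--         pid, desc = matched[i][0], matched[i][1]
--         j = i
--         disp = []
--         while j < n and matched[j][0] == pid and matched[j][1] == desc:
--             disp.append(matched[j][2])
--             j += 1
--         shown = ", ".join(sorted(dict.fromkeys(disp), key=lambda r: (r[0].upper(), len(r), r)))
--         out.append(f"- {shown} {desc} {pid}----->{j - i}")
--         i = j
--     return "\n".join(out)
-- ===== Notes on version B (the rewrite author's own statement) =====
-- stated objective: alternative
-- what changed: Replaces A's incremental dict-of-lists grouping (setdefault/append then sorted(items())) with a fused parse-and-lookup pass producing a flat matched list, an in-place stable sort by (part_id, desc), and a single run-scanning loop that emits one line per equal-key run (groupby style); only one emptiness check remains.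
import Mathlib
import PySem

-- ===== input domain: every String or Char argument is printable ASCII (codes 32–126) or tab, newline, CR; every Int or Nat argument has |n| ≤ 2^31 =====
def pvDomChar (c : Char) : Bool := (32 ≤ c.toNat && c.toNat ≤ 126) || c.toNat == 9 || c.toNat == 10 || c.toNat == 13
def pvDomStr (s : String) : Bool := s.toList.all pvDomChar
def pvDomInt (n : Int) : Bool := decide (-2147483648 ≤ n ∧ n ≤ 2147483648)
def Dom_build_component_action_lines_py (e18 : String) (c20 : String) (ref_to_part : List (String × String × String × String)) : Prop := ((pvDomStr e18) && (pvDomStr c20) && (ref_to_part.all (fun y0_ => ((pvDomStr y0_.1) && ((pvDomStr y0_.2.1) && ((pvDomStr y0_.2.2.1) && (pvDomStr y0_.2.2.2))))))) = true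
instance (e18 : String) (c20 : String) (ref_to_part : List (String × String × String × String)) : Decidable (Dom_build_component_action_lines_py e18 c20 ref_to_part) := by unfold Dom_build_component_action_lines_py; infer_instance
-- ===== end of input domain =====

-- B replaces A's dict-of-lists grouping with one fused parse-and-lookup pass, a stable sort of
-- the matched records by (part_id, desc), and a run-scanning emit loop (objective: alternative).

-- ===== PORT A =====
-- sorted(set(ref_list), key=lambda r: (r[0].upper(), len(r), r)) — the tuple-key sort is ported
-- as the stable sort by (len(r), r) followed by the stable sort by r[0].upper(), which is exact
-- by stability; the `.getD ' '` default of r[0] is only reached on refs excluded by Pre_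
-- (Python raises IndexError there).
def pvSortRefsA (lst : List String) : List String :=
  PySem.List.sorted
    (PySem.List.sorted2 (PySem.Set.ofList lst) (fun r => PySem.Str.len r) (fun r => r))
    (fun r => PySem.Str.upper (String.singleton ((PySem.Str.pyGet? r 0).getD ' ')))

-- one output line "- {refs_str} {desc} {part_id}----->{count}"
def pvLineA (p de : String) (lst : List String) : String :=
  "- " ++ PySem.Str.join ", " (pvSortRefsA lst) ++ " " ++ de ++
    " " ++ p ++ "----->" ++ PySem.Int.toStr (lst.length : Int)

-- the body of A's grouping loop: skip unmatched refs, else setdefault(gk, []).append(display_ref),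
-- i.e. Dict.modify gk [] (· ++ [display_ref])
def pvStepA (ref_to_part : List (String × String × String × String))
    (d : PySem.Dict (String × String) (List String)) (ref : String) :
    PySem.Dict (String × String) (List String) :=
  match (PySem.Dict.mk ref_to_part).get? (PySem.Str.lower ref) with
  | some t => d.modify (t.1, t.2.1) [] (fun l => l ++ [t.2.2])
  | none => d

def build_component_action_lines_py (e18 : String) (c20 : String) (ref_to_part : List (String × String × String × String)) : String :=
  let combined := PySem.Str.replace (PySem.Str.replace (e18 ++ "," ++ c20) "\n" " ") "\r" " "
  -- combined.split(","): split? is none only for sep = "", so .getD [] is exact here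
  let refs := (((PySem.Str.split? combined ",").getD []).map PySem.Str.strip).filter (fun r => r != "")
  if refs.isEmpty || ref_to_part.isEmpty then "" else
  let g := refs.foldl (pvStepA ref_to_part) (PySem.Dict.empty)
  if g.items.isEmpty then "" else
  -- sorted(dict.items()): keys are distinct, so Python's tuple sort is the (part_id, desc) sort
  PySem.Str.join "\n" ((PySem.List.sorted2 g.items (fun it => it.1.1) (fun it => it.1.2)).map
    (fun it => pvLineA it.1.1 it.1.2 it.2))

-- ===== PORT B =====
-- the fused loop body: skip blank tokens, look the stripped token up immediately
def pvMatchB (ref_to_part : List (String × String × String × String)) (tok : String) :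
    Option (String × String × String) :=
  let s := PySem.Str.strip tok
  if s == "" then none else (PySem.Dict.mk ref_to_part).get? (PySem.Str.lower s)

-- the run-scanning while loop: one line per maximal run of equal (part_id, desc);
-- dict.fromkeys(disp) is PySem.List.dedup; the tuple-key sort is staged as in port A
def pvEmitB : List (String × String × String) → List String
  | [] => []
  | m :: rest =>
    let run := rest.takeWhile (fun t => t.1 == m.1 && t.2.1 == m.2.1)
    ("- " ++ PySem.Str.join ", "
        (PySem.List.sorted
          (PySem.List.sorted2 (PySem.List.dedup (m.2.2 :: run.map (fun t => t.2.2)))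
            (fun r => PySem.Str.len r) (fun r => r))
          (fun r => PySem.Str.upper (String.singleton ((PySem.Str.pyGet? r 0).getD ' ')))) ++
      " " ++ m.2.1 ++ " " ++ m.1 ++ "----->" ++ PySem.Int.toStr ((run.length : Int) + 1))
      :: pvEmitB (rest.dropWhile (fun t => t.1 == m.1 && t.2.1 == m.2.1))
termination_by l => l.length
decreasing_by
  have h := (List.dropWhile_sublist (l := rest)
    (p := fun t => t.1 == m.1 && t.2.1 == m.2.1)).length_le
  simp only [List.length_cons]
  omega

def build_component_action_lines_py_alt (e18 : String) (c20 : String) (ref_to_part : List (String × String × String × String)) : String :=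
  let matched := (((PySem.Str.split? (PySem.Str.replace (PySem.Str.replace (e18 ++ "," ++ c20) "\n" " ") "\r" " ") ",").getD [])).filterMap (pvMatchB ref_to_part)
  if matched.isEmpty then "" else
  PySem.Str.join "\n" (pvEmitB (PySem.List.sorted2 matched (fun t => t.1) (fun t => t.2.1)))

-- ===== PRECONDITION & SPEC =====
-- Pre_ excludes exactly the inputs on which Python A raises: some comma-separated ref parsed
-- from e18/c20 resolves (case-insensitively) to a table entry whose display_ref is the empty
-- string — there A's in-group sort key evaluates r[0] and raises IndexError (B raises there too).
def Pre_build_component_action_lines_py (e18 : String) (c20 : String) (ref_to_part : List (String × String × String × String)) : Prop :=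
  ((((PySem.Str.split? (PySem.Str.replace (PySem.Str.replace (e18 ++ "," ++ c20) "\n" " ") "\r" " ") ",").getD []).map PySem.Str.strip).filter (fun r => r != "")).all
    (fun r => ((PySem.Dict.mk ref_to_part).get? (PySem.Str.lower r)).elim true (fun t => t.2.2 != "")) = true
instance (e18 : String) (c20 : String) (ref_to_part : List (String × String × String × String)) : Decidable (Pre_build_component_action_lines_py e18 c20 ref_to_part) := by unfold Pre_build_component_action_lines_py; infer_instance

def pvWitness_build_component_action_lines_py : String × String × (List (String × String × String × String)) :=
  ("F1, f2", "f1", [("f1", "2215-0026", "FUSE", "F1"), ("f2", "2215-0026", "FUSE", "F2")])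

def Spec_build_component_action_lines_py (e18 : String) (c20 : String) (ref_to_part : List (String × String × String × String)) (out : String) : Prop := out = build_component_action_lines_py_alt e18 c20 ref_to_part
instance (e18 : String) (c20 : String) (ref_to_part : List (String × String × String × String)) (out : String) : Decidable (Spec_build_component_action_lines_py e18 c20 ref_to_part out) := by unfold Spec_build_component_action_lines_py; infer_instance

-- ===== CLAIM (what is proved, stated in full; the proofs are below) =====
def Claim_equal_build_component_action_lines_py : Prop := ∀ (e18 : String) (c20 : String) (ref_to_part : List (String × String × String × String)), Dom_build_component_action_lines_py e18 c20 ref_to_part → Pre_build_component_action_lines_py e18 c20 ref_to_part → Spec_build_component_action_lines_py e18 c20 ref_to_part (build_component_action_lines_py e18 c20 ref_to_part)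

-- ===== LEMMAS AND PROOFS =====

-- the grouping key of a matched record
def pvKf (t : String × String × String) : String × String := (t.1, t.2.1)

-- the strict-lex 'before' comparators used by sorted2 on records and on keys
def pvBT (a b : String × String × String) : Bool :=
  decide (a.1.toList < b.1.toList) || (!decide (b.1.toList < a.1.toList) && decide (a.2.1.toList < b.2.1.toList))
def pvBK (a b : String × String) : Bool :=
  decide (a.1.toList < b.1.toList) || (!decide (b.1.toList < a.1.toList) && decide (a.2.toList < b.2.toList))

-- A's grouping step, with the matched record already looked up
def pvStep (d : PySem.Dict (String × String) (List String)) (t : String × String × String) :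
    PySem.Dict (String × String) (List String) :=
  d.modify (pvKf t) [] (fun l => l ++ [t.2.2])

-- the distinct group keys of the matched records, first occurrences in order
def pvGks (ms : List (String × String × String)) : List (String × String) :=
  PySem.Set.ofList (ms.map pvKf)

-- the sorted distinct group keys
def pvSK (ms : List (String × String × String)) : List (String × String) :=
  PySem.List.sorted2 (pvGks ms) (fun k => k.1) (fun k => k.2)

-- one group's records, in original order
def pvG (ms : List (String × String × String)) (gk : String × String) :
    List (String × String × String) :=
  ms.filter (fun t => pvKf t == gk)

-- the display_refs of one group, in matched order
def pvF (ms : List (String × String × String)) (gk : String × String) : List String :=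
  (pvG ms gk).map (fun m => m.2.2)

theorem pv_bt_eq_bk (a b : String × String × String) : pvBT a b = pvBK (pvKf a) (pvKf b) := rfl

theorem pv_bk_irrefl (a : String × String) : pvBK a a = false := by simp [pvBK]

theorem pv_bk_iff (a b : String × String) :
    pvBK a b = true ↔ a.1.toList < b.1.toList ∨ (a.1.toList = b.1.toList ∧ a.2.toList < b.2.toList) := by
  simp only [pvBK, Bool.or_eq_true, Bool.and_eq_true, Bool.not_eq_eq_eq_not, Bool.not_true,
    decide_eq_true_eq, decide_eq_false_iff_not]
  constructor
  · rintro (h | ⟨h1, h2⟩)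
    · exact Or.inl h
    · rcases lt_trichotomy a.1.toList b.1.toList with h' | h' | h'
      · exact Or.inl h'
      · exact Or.inr ⟨h', h2⟩
      · exact absurd h' h1
  · rintro (h | ⟨h1, h2⟩)
    · exact Or.inl h
    · exact Or.inr ⟨by rw [h1]; exact lt_irrefl _, h2⟩

theorem pv_bk_trans {a b c : String × String} (h1 : pvBK a b = true) (h2 : pvBK b c = true) :
    pvBK a c = true := by
  rw [pv_bk_iff] at *
  rcases h1 with h1 | ⟨h1a, h1b⟩ <;> rcases h2 with h2 | ⟨h2a, h2b⟩
  · exact Or.inl (lt_trans h1 h2)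
  · exact Or.inl (h2a ▸ h1)
  · exact Or.inl (h1a ▸ h2)
  · exact Or.inr ⟨h1a.trans h2a, lt_trans h1b h2b⟩

theorem pv_bk_total {a b : String × String} (h1 : pvBK a b = false) (h2 : pvBK b a = false) :
    a = b := by
  have hi : ∀ (x y : String × String), pvBK x y = false →
      ¬ x.1.toList < y.1.toList ∧ (¬ y.1.toList < x.1.toList → ¬ x.2.toList < y.2.toList) := by
    intro x y h
    constructor
    · intro hc
      have : pvBK x y = true := (pv_bk_iff x y).mpr (Or.inl hc)
      simp [this] at h
    · intro hn hc
      have hxy : ¬ x.1.toList < y.1.toList := fun hz => by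
        have : pvBK x y = true := (pv_bk_iff x y).mpr (Or.inl hz)
        simp [this] at h
      have h1 : x.1.toList = y.1.toList := le_antisymm (not_lt.mp hn) (not_lt.mp hxy)
      have : pvBK x y = true := (pv_bk_iff x y).mpr (Or.inr ⟨h1, hc⟩)
      simp [this] at h
  obtain ⟨ha1, ha2⟩ := hi a b h1
  obtain ⟨hb1, hb2⟩ := hi b a h2
  have he1 : a.1.toList = b.1.toList := le_antisymm (not_lt.mp hb1) (not_lt.mp ha1)
  have he2 : a.2.toList = b.2.toList := le_antisymm (not_lt.mp (hb2 ha1)) (not_lt.mp (ha2 hb1))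
  have : a.1 = b.1 := String.toList_injective he1
  have h2' : a.2 = b.2 := String.toList_injective he2
  exact Prod.ext this h2'  

theorem pv_bk_ne {a b : String × String} (h : pvBK a b = true) : a ≠ b := by
  intro e; subst e; simp [pv_bk_irrefl] at h

-- insertBy: prepend when the head is already after x; skip a front that is all before x
theorem pv_insertBy_all {α : Type} (b : α → α → Bool) (x : α) (l : List α)
    (h : ∀ y ∈ l, b x y = true) : PySem.List.insertBy b x l = x :: l := by
  cases l with
  | nil => rfl
  | cons y ys => simp [PySem.List.insertBy, h y (List.mem_cons_self ..)]

theorem pv_insertBy_skip {α : Type} (b : α → α → Bool) (x : α) (front rest : List α)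
    (h : ∀ y ∈ front, b x y = false) :
    PySem.List.insertBy b x (front ++ rest) = front ++ PySem.List.insertBy b x rest := by
  induction front with
  | nil => rfl
  | cons y ys ih =>
    have hy := h y (List.mem_cons_self ..)
    simp only [List.cons_append, PySem.List.insertBy, hy, Bool.false_eq_true, if_false]
    rw [ih (fun z hz => h z (List.mem_cons_of_mem _ hz))]

theorem pv_flatMap_congr {α β : Type} {l : List α} {f g : α → List β}
    (h : ∀ a ∈ l, f a = g a) : l.flatMap f = l.flatMap g := by
  induction l with
  | nil => rfl
  | cons a t ih =>
    simp only [List.flatMap_cons, h a (List.mem_cons_self ..),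
      ih (fun z hz => h z (List.mem_cons_of_mem _ hz))]

-- sorted2 is the left fold of insertBy with the strict-lex 'before'
theorem pv_sorted2_eq_foldT (ms : List (String × String × String)) :
    PySem.List.sorted2 ms (fun t => t.1) (fun t => t.2.1)
      = ms.foldl (fun acc x => PySem.List.insertBy pvBT x acc) [] := by
  unfold pvBT
  simp [PySem.List.sorted2]

theorem pv_sorted2_eq_foldK (ks : List (String × String)) :
    PySem.List.sorted2 ks (fun k => k.1) (fun k => k.2)
      = ks.foldl (fun acc x => PySem.List.insertBy pvBK x acc) [] := by
  unfold pvBK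
  simp [PySem.List.sorted2]

theorem pv_mem_foldl_ins (S : List (String × String)) :
    ∀ (acc : List (String × String)) (y : String × String),
      (y ∈ S.foldl (fun a x => PySem.List.insertBy pvBK x a) acc ↔ y ∈ acc ∨ y ∈ S) := by
  induction S with
  | nil => intro acc y; simp
  | cons s t ih =>
    intro acc y
    rw [List.foldl_cons, ih]
    rw [PySem.List.mem_insertBy _ _ _ _]
    constructor
    · rintro ((h | h) | h)
      · exact Or.inr (h ▸ List.mem_cons_self ..)
      · exact Or.inl h
      · exact Or.inr (List.mem_cons_of_mem _ h)
    · rintro (h | h)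
      · exact Or.inl (Or.inr h)
      · rcases List.mem_cons.mp h with h | h
        · exact Or.inl (Or.inl h)
        · exact Or.inr h

theorem pv_pairwise_insertBy (x : String × String) :
    ∀ (l : List (String × String)), l.Pairwise (fun a b => pvBK a b = true) →
      (∀ y ∈ l, y ≠ x) →
      (PySem.List.insertBy pvBK x l).Pairwise (fun a b => pvBK a b = true) := by
  intro l
  induction l with
  | nil => intro _ _; simp [PySem.List.insertBy]
  | cons y ys ih =>
    intro hp hx
    rcases List.pairwise_cons.mp hp with ⟨hy, hys⟩
    by_cases hb : pvBK x y = true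
    · simp only [PySem.List.insertBy, hb, if_true]
      refine List.pairwise_cons.mpr ⟨?_, hp⟩
      intro z hz
      rcases List.mem_cons.mp hz with h | h
      · exact h ▸ hb
      · exact pv_bk_trans hb (hy z h)
    · simp only [PySem.List.insertBy, hb, if_false]
      refine List.pairwise_cons.mpr ⟨?_, ih hys (fun z hz => hx z (List.mem_cons_of_mem _ hz))⟩
      intro z hz
      rcases (PySem.List.mem_insertBy _ _ _ _).mp hz with h | h
      · subst h
        cases hb2 : pvBK y z with
        | true => rfl
        | false =>
          exact absurd (pv_bk_total (Bool.eq_false_iff.mpr hb) hb2).symm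
            (hx y (List.mem_cons_self ..))
      · exact hy z h

theorem pv_pairwise_foldl_ins (S : List (String × String)) :
    ∀ (acc : List (String × String)), S.Nodup →
      acc.Pairwise (fun a b => pvBK a b = true) → (∀ s ∈ S, s ∉ acc) →
      (S.foldl (fun a x => PySem.List.insertBy pvBK x a) acc).Pairwise
        (fun a b => pvBK a b = true) := by
  induction S with
  | nil => intro acc _ hp _; exact hp
  | cons s t ih =>
    intro acc hnd hp hni
    rcases List.nodup_cons.mp hnd with ⟨hs, hnd'⟩
    rw [List.foldl_cons]
    refine ih _ hnd' (pv_pairwise_insertBy s acc hp ?_) ?_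
    · intro y hy he; exact hni s (List.mem_cons_self ..) (he ▸ hy)
    · intro z hz hzm
      rcases (PySem.List.mem_insertBy _ _ _ _).mp hzm with h | h
      · exact hs (h ▸ hz)
      · exact hni z (List.mem_cons_of_mem _ hz) h

theorem pv_sk_pairwise (ms : List (String × String × String)) :
    (pvSK ms).Pairwise (fun a b => pvBK a b = true) := by
  rw [pvSK, pv_sorted2_eq_foldK]
  exact pv_pairwise_foldl_ins _ _ (PySem.Set.nodup_ofList _) (List.Pairwise.nil) (by simp)

theorem pv_mem_sk (ms : List (String × String × String)) (k : String × String) :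
    k ∈ pvSK ms ↔ k ∈ ms.map pvKf := by
  rw [pvSK, pv_sorted2_eq_foldK, pv_mem_foldl_ins]
  simp [pvGks, PySem.Set.mem_ofList]

-- master: inserting a record into a concatenation of key-grouped blocks
theorem pv_master (G : String × String → List (String × String × String)) :
    ∀ (ks : List (String × String)), ks.Pairwise (fun a b => pvBK a b = true) →
      (∀ gk ∈ ks, ∀ t ∈ G gk, pvKf t = gk) → ∀ (x : String × String × String),
      (pvKf x ∉ ks → G (pvKf x) = []) →
      PySem.List.insertBy pvBT x (ks.flatMap G)
        = (if pvKf x ∈ ks then ks else PySem.List.insertBy pvBK (pvKf x) ks).flatMap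
            (fun gk => if gk = pvKf x then G gk ++ [x] else G gk) := by
  intro ks
  induction ks with
  | nil =>
    intro _ _ x hnew
    simp [PySem.List.insertBy, hnew (by simp)]
  | cons g ks' ih =>
    intro hpw hG x hnew
    rcases List.pairwise_cons.mp hpw with ⟨hg, hpw'⟩
    have hGg : ∀ t ∈ G g, pvKf t = g := hG g (List.mem_cons_self ..)
    by_cases hxg : pvBK (pvKf x) g = true
    · -- x comes before the whole list
      have hnm : pvKf x ∉ g :: ks' := by
        intro hmem
        rcases List.mem_cons.mp hmem with h | h
        · rw [h] at hxg; simp [pv_bk_irrefl] at hxg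
        · have := pv_bk_trans hxg (hg _ h)
          simp [pv_bk_irrefl] at this
      have hall : ∀ y ∈ (g :: ks').flatMap G, pvBT x y = true := by
        intro y hy
        rcases List.mem_flatMap.mp hy with ⟨gk, hgk, hyG⟩
        rw [pv_bt_eq_bk, hG gk hgk y hyG]
        rcases List.mem_cons.mp hgk with h | h
        · exact h ▸ hxg
        · exact pv_bk_trans hxg (hg _ h)
      rw [pv_insertBy_all _ _ _ hall]
      rw [if_neg hnm]
      have hins : PySem.List.insertBy pvBK (pvKf x) (g :: ks') = pvKf x :: g :: ks' := by
        simp [PySem.List.insertBy, hxg]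
      rw [hins]
      have hgne : ¬ (g = pvKf x) := fun e => hnm (e ▸ List.mem_cons_self ..)
      have hks' : ∀ gk ∈ ks', ¬ (gk = pvKf x) :=
        fun gk hgk e => hnm (e ▸ List.mem_cons_of_mem _ hgk)
      have hcongr : List.flatMap (fun gk => if gk = pvKf x then G gk ++ [x] else G gk) ks'
          = List.flatMap G ks' :=
        pv_flatMap_congr (fun gk hgk => by rw [if_neg (hks' gk hgk)])
      simp only [List.flatMap_cons, if_pos rfl, if_neg hgne,
        hnew hnm, List.nil_append, hcongr]
      simp
    · by_cases heq : pvKf x = g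
      · -- x joins the first group
        have hfront : ∀ y ∈ G g, pvBT x y = false := by
          intro y hy
          rw [pv_bt_eq_bk, hGg y hy, heq]
          exact pv_bk_irrefl g
        rw [List.flatMap_cons, pv_insertBy_skip _ _ _ _ hfront]
        have hall : ∀ y ∈ ks'.flatMap G, pvBT x y = true := by
          intro y hy
          rcases List.mem_flatMap.mp hy with ⟨gk, hgk, hyG⟩
          rw [pv_bt_eq_bk, hG gk (List.mem_cons_of_mem _ hgk) y hyG, heq]
          exact hg _ hgk
        rw [pv_insertBy_all _ _ _ hall]
        rw [if_pos (by rw [heq]; exact List.mem_cons_self ..)]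
        have hks' : ∀ gk ∈ ks', ¬ (gk = pvKf x) := by
          intro gk hgk e
          have := pv_bk_ne (hg _ hgk)
          exact this ((e.trans heq).symm)
        have hcongr : List.flatMap (fun gk => if gk = pvKf x then G gk ++ [x] else G gk) ks'
            = List.flatMap G ks' :=
          pv_flatMap_congr (fun gk hgk => by rw [if_neg (hks' gk hgk)])
        simp only [List.flatMap_cons, if_pos heq.symm, hcongr]
        simp
      · -- x belongs strictly after the first group
        have hfront : ∀ y ∈ G g, pvBT x y = false := by
          intro y hy
          rw [pv_bt_eq_bk, hGg y hy]
          exact Bool.eq_false_iff.mpr hxg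
        rw [List.flatMap_cons, pv_insertBy_skip _ _ _ _ hfront]
        have hnew' : pvKf x ∉ ks' → G (pvKf x) = [] := by
          intro h
          exact hnew (by simp [List.mem_cons, heq, h])
        rw [ih hpw' (fun gk hgk => hG gk (List.mem_cons_of_mem _ hgk)) x hnew']
        have hmem : (pvKf x ∈ g :: ks') ↔ (pvKf x ∈ ks') := by
          simp [List.mem_cons, heq]
        have hgne2 : ¬ (g = pvKf x) := fun e => heq (Eq.symm e)
        by_cases hm : pvKf x ∈ ks'
        · rw [if_pos hm, if_pos (hmem.mpr hm)]
          simp only [List.flatMap_cons, if_neg hgne2]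
        · rw [if_neg hm, if_neg (fun h => hm (hmem.mp h))]
          have : PySem.List.insertBy pvBK (pvKf x) (g :: ks')
              = g :: PySem.List.insertBy pvBK (pvKf x) ks' := by
            simp [PySem.List.insertBy, hxg]
          rw [this]
          simp only [List.flatMap_cons, if_neg hgne2]

-- the stable sort by (part_id, desc) is the sorted keys' groups concatenated in original order
theorem pv_sorted_flat (ms : List (String × String × String)) :
    PySem.List.sorted2 ms (fun t => t.1) (fun t => t.2.1)
      = (pvSK ms).flatMap (pvG ms) := by
  induction ms using List.reverseRecOn with
  | nil => simp [pv_sorted2_eq_foldT, pvSK, pvGks, pv_sorted2_eq_foldK, pvG]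
  | append_singleton ms x ih =>
    rw [pv_sorted2_eq_foldT, List.foldl_append, List.foldl_cons, List.foldl_nil,
      ← pv_sorted2_eq_foldT, ih]
    have hG : ∀ gk ∈ pvSK ms, ∀ t ∈ pvG ms gk, pvKf t = gk := by
      intro gk _ t ht
      exact beq_iff_eq.mp (List.mem_filter.mp ht).2
    have hnew : pvKf x ∉ pvSK ms → pvG ms (pvKf x) = [] := by
      intro h
      have h2 : pvKf x ∉ ms.map pvKf := fun hm => h ((pv_mem_sk ms _).mpr hm)
      refine List.filter_eq_nil_iff.mpr (fun t ht => ?_)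
      simp only [beq_iff_eq]
      intro he
      exact h2 (he ▸ List.mem_map_of_mem ht)
    rw [pv_master (pvG ms) (pvSK ms) (pv_sk_pairwise ms) hG x hnew]
    -- the sorted key list of ms ++ [x]
    have hkeys : pvSK (ms ++ [x])
        = if pvKf x ∈ pvSK ms then pvSK ms else PySem.List.insertBy pvBK (pvKf x) (pvSK ms) := by
      have h1 : pvGks (ms ++ [x]) = PySem.Set.add (pvGks ms) (pvKf x) := by
        rw [pvGks, List.map_append, List.map_cons, List.map_nil,
          PySem.Set.ofList_append_singleton]
        rfl
      have h2 : PySem.Set.add (pvGks ms) (pvKf x)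
          = if pvKf x ∈ pvGks ms then pvGks ms else pvGks ms ++ [pvKf x] := by
        simp [PySem.Set.add, PySem.Set.contains]
      have hmm : (pvKf x ∈ pvGks ms) ↔ (pvKf x ∈ pvSK ms) := by
        rw [pv_mem_sk, pvGks, PySem.Set.mem_ofList]
      by_cases hm : pvKf x ∈ pvSK ms
      · rw [pvSK, h1, h2, if_pos (hmm.mpr hm), if_pos hm]; rfl
      · rw [pvSK, h1, h2, if_neg (fun h => hm (hmm.mp h)), if_neg hm,
          pv_sorted2_eq_foldK, List.foldl_append, List.foldl_cons, List.foldl_nil,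
          ← pv_sorted2_eq_foldK]
        rfl
    rw [hkeys]
    refine pv_flatMap_congr (fun gk _ => ?_)
    by_cases hgk : gk = pvKf x
    · rw [if_pos hgk, pvG, pvG, List.filter_append]
      simp [hgk]
    · rw [if_neg hgk, pvG, pvG, List.filter_append]
      have : (pvKf x == gk) = false := by
        simp only [beq_eq_false_iff_ne, ne_eq]
        exact fun e => hgk e.symm
      simp [this]

theorem pv_takeWhile_all {α : Type} (p : α → Bool) (a b : List α)
    (h1 : ∀ y ∈ a, p y = true) (h2 : ∀ y ∈ b, p y = false) :
    (a ++ b).takeWhile p = a := by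
  induction a with
  | nil =>
    cases b with
    | nil => rfl
    | cons y ys => simp [List.takeWhile_cons, h2 y (List.mem_cons_self ..)]
  | cons y ys ih =>
    simp only [List.cons_append, List.takeWhile_cons, h1 y (List.mem_cons_self ..), if_true]
    rw [ih (fun z hz => h1 z (List.mem_cons_of_mem _ hz))]

theorem pv_dropWhile_all {α : Type} (p : α → Bool) (a b : List α)
    (h1 : ∀ y ∈ a, p y = true) (h2 : ∀ y ∈ b, p y = false) :
    (a ++ b).dropWhile p = b := by
  induction a with
  | nil =>
    cases b with
    | nil => rfl
    | cons y ys => simp [List.dropWhile_cons, h2 y (List.mem_cons_self ..)]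
  | cons y ys ih =>
    simp only [List.cons_append, List.dropWhile_cons, h1 y (List.mem_cons_self ..), if_true]
    exact ih (fun z hz => h1 z (List.mem_cons_of_mem _ hz))

-- the run-scanning emit loop over a concatenation of nonempty key-grouped blocks
theorem pv_emit_flat (G : String × String → List (String × String × String)) :
    ∀ (ks : List (String × String)), ks.Pairwise (fun a b => pvBK a b = true) →
      (∀ gk ∈ ks, ∀ t ∈ G gk, pvKf t = gk) → (∀ gk ∈ ks, G gk ≠ []) →
      pvEmitB (ks.flatMap G)
        = ks.map (fun gk => pvLineA gk.1 gk.2 ((G gk).map (fun m => m.2.2))) := by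
  intro ks
  induction ks with
  | nil => intro _ _ _; simp [pvEmitB]
  | cons gk ks' ih =>
    intro hpw hG hne
    rcases List.pairwise_cons.mp hpw with ⟨hg, hpw'⟩
    cases hG0 : G gk with
    | nil => exact absurd hG0 (hne gk (List.mem_cons_self ..))
    | cons m ms0 =>
      have hkm : pvKf m = gk := hG gk (List.mem_cons_self ..) m (by rw [hG0]; exact List.mem_cons_self ..)
      have hp1 : ∀ t ∈ ms0, (t.1 == m.1 && t.2.1 == m.2.1) = true := by
        intro t ht
        have : pvKf t = gk := hG gk (List.mem_cons_self ..) t (by rw [hG0]; exact List.mem_cons_of_mem _ ht)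
        have he : pvKf t = pvKf m := by rw [this, hkm]
        have h1 : t.1 = m.1 := congrArg (fun p : String × String => p.1) he
        have h2 : t.2.1 = m.2.1 := congrArg (fun p : String × String => p.2) he
        simp [h1, h2]
      have hp2 : ∀ t ∈ ks'.flatMap G, (t.1 == m.1 && t.2.1 == m.2.1) = false := by
        intro t ht
        rcases List.mem_flatMap.mp ht with ⟨gk', hgk', htG⟩
        have hkt : pvKf t = gk' := hG gk' (List.mem_cons_of_mem _ hgk') t htG
        have hne' : gk' ≠ gk := fun e => pv_bk_ne (hg _ hgk') e.symm
        rw [Bool.and_eq_false_iff]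
        by_cases h1 : t.1 = m.1
        · refine Or.inr ?_
          simp only [beq_eq_false_iff_ne, ne_eq]
          intro h2
          exact hne' (by rw [← hkt, ← hkm]; exact Prod.ext h1 h2)
        · exact Or.inl (by simp [h1])
      rw [List.flatMap_cons, hG0]
      have hshape : (m :: ms0) ++ ks'.flatMap G = m :: (ms0 ++ ks'.flatMap G) := rfl
      rw [hshape, pvEmitB]
      rw [pv_takeWhile_all _ _ _ hp1 hp2, pv_dropWhile_all _ _ _ hp1 hp2]
      rw [List.map_cons]
      congr 1
      · -- the emitted line is A's line for this group
        rw [pvLineA, pvSortRefsA, hG0]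
        have hd : PySem.List.dedup (m.2.2 :: ms0.map (fun t => t.2.2))
            = PySem.Set.ofList ((m :: ms0).map (fun m => m.2.2)) := by
          simp [List.map_cons]
        rw [hd]
        have hc : ((ms0.length : Int) + 1) = (((m :: ms0).map (fun m => m.2.2)).length : Int) := by
          simp
        rw [hc, ← hkm]
        rfl
      · exact ih hpw' (fun g hgk => hG g (List.mem_cons_of_mem _ hgk))
          (fun g hgk => hne g (List.mem_cons_of_mem _ hgk))

-- A's fold over refs, skipping unmatched ones, is a fold over the matched records
theorem pv_foldA (rtp : List (String × String × String × String)) :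
    ∀ (refs : List String) (d : PySem.Dict (String × String) (List String)),
      refs.foldl (pvStepA rtp) d
        = (refs.filterMap (fun r => (PySem.Dict.mk rtp).get? (PySem.Str.lower r))).foldl pvStep d := by
  intro refs
  induction refs with
  | nil => intro d; rfl
  | cons r rs ih =>
    intro d
    cases h : (PySem.Dict.mk rtp).get? (PySem.Str.lower r) <;>
      simp [pvStepA, pvStep, pvKf, h, ih]

-- B's fused parse-and-lookup pass is A's strip/filter pass followed by the lookups
theorem pv_parse (rtp : List (String × String × String × String)) (toks : List String) :
    toks.filterMap (pvMatchB rtp)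
      = ((toks.map PySem.Str.strip).filter (fun r => r != "")).filterMap
          (fun r => (PySem.Dict.mk rtp).get? (PySem.Str.lower r)) := by
  induction toks with
  | nil => rfl
  | cons tok toks ih =>
    simp only [List.filterMap_cons, List.map_cons, List.filter_cons]
    by_cases hs : PySem.Str.strip tok == ""
    · have h1 : pvMatchB rtp tok = none := by simp [pvMatchB, hs]
      have h2 : (PySem.Str.strip tok != "") = false := by simpa using hs
      rw [h1, h2]
      simpa using ih
    · have hb : (PySem.Str.strip tok == "") = false := Bool.eq_false_iff.mpr hs
      have h1 : pvMatchB rtp tok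
          = (PySem.Dict.mk rtp).get? (PySem.Str.lower (PySem.Str.strip tok)) := by
        simp [pvMatchB, hb]
      have h2 : (PySem.Str.strip tok != "") = true := by simpa using hs
      rw [h1, h2]
      simp only [if_true]
      rw [List.filterMap_cons]
      cases h : (PySem.Dict.mk rtp).get? (PySem.Str.lower (PySem.Str.strip tok)) <;>
        simp [h, ih]

-- value of the grouping dict at any key
theorem pv_getD_fold :
    ∀ (ms : List (String × String × String)) (d : PySem.Dict (String × String) (List String))
      (gk : String × String),
      (ms.foldl pvStep d).getD gk []
        = d.getD gk [] ++ (ms.filter (fun m => pvKf m == gk)).map (fun m => m.2.2) := by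
  intro ms
  induction ms with
  | nil => intro d gk; simp
  | cons m ms ih =>
    intro d gk
    by_cases h : pvKf m = gk
    · simp only [List.foldl_cons, ih, List.filter_cons, h, beq_self_eq_true, if_pos]
      have : (pvStep d m).getD gk [] = d.getD gk [] ++ [m.2.2] := by
        rw [← h]
        simpa [pvStep] using PySem.Dict.getD_modify_self d (pvKf m) [] (fun l => l ++ [m.2.2])
      simp [this]
    · have hne : gk ≠ pvKf m := fun e => h e.symm
      have : (pvStep d m).getD gk [] = d.getD gk [] :=
        PySem.Dict.getD_modify_of_ne d [] (fun l => l ++ [m.2.2]) hne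
      simp [List.foldl_cons, ih, h, this]

-- a Dict with Nodup keys is its keys list paired with its lookups
theorem pv_items_eq_keys_map {κ ν : Type} [BEq κ] [LawfulBEq κ]
    (d : PySem.Dict κ ν) (v0 : ν) (h : d.keys.Nodup) :
    d.items = d.keys.map (fun k => (k, d.getD k v0)) := by
  obtain ⟨l⟩ := d
  induction l with
  | nil => rfl
  | cons p l ih =>
    simp only [PySem.Dict.keys] at h ih ⊢
    simp only [List.map_cons, List.nodup_cons] at h ⊢
    obtain ⟨hp, hl⟩ := h
    refine List.cons_eq_cons.mpr ⟨?_, ?_⟩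
    · have : (PySem.Dict.mk (p :: l)).getD p.1 v0 = p.2 := by
        simp [PySem.Dict.getD, PySem.Dict.get?]
      simp [this]
    · have hcongr : ∀ k ∈ List.map (fun x : κ × ν => x.1) l,
          (PySem.Dict.mk l).getD k v0 = (PySem.Dict.mk (p :: l)).getD k v0 := by
        intro k hk
        have hkne : p.1 ≠ k := fun e => hp (e ▸ hk)
        simp [PySem.Dict.getD, PySem.Dict.get?, List.find?_cons, beq_iff_eq, hkne]
      calc l = List.map (fun k => (k, (PySem.Dict.mk l).getD k v0)) (List.map (fun x => x.1) l) := ih hl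
        _ = List.map (fun k => (k, (PySem.Dict.mk (p :: l)).getD k v0)) (List.map (fun x => x.1) l) :=
          List.map_congr_left (fun k hk => by rw [hcongr k hk])

-- keys of the grouping dict: the distinct group keys, first occurrences in order
theorem pv_keys_fold (ms : List (String × String × String)) :
    (ms.foldl pvStep PySem.Dict.empty).keys = pvGks ms := by
  have h2 : (ms.foldl pvStep PySem.Dict.empty).keys
      = PySem.Set.update PySem.Dict.empty.keys (ms.map pvKf) :=
    PySem.Dict.keys_foldl_modify_key ms pvKf ([] : List String)
      (fun _ m => (fun l => l ++ [m.2.2])) PySem.Dict.empty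
  rw [h2]
  show PySem.Set.update [] _ = _
  rw [PySem.Set.update_nil_left]
  rfl

-- the grouping dict's items: each distinct group key with its group's display_refs
theorem pv_items_fold (ms : List (String × String × String)) :
    (ms.foldl pvStep PySem.Dict.empty).items
      = (pvGks ms).map (fun gk => (gk, pvF ms gk)) := by
  rw [pv_items_eq_keys_map (ms.foldl pvStep PySem.Dict.empty) ([] : List String)
      (by rw [pv_keys_fold]; exact PySem.Set.nodup_ofList _)]
  rw [pv_keys_fold]
  refine List.map_congr_left (fun gk _ => ?_)
  rw [pv_getD_fold]
  rfl

-- insertBy commutes with map when the comparison factors through the map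
theorem pv_insertBy_map {α β : Type} (before : β → β → Bool) (h : α → β) :
    ∀ (l : List α) (x : α),
      PySem.List.insertBy before (h x) (l.map h)
        = (PySem.List.insertBy (fun a b => before (h a) (h b)) x l).map h := by
  intro l
  induction l with
  | nil => intro x; rfl
  | cons y ys ih =>
    intro x
    simp only [List.map_cons, PySem.List.insertBy]
    by_cases hb : before (h x) (h y) = true <;> simp [hb, ih]

theorem pv_foldl_insertBy_map {α β : Type} (before : β → β → Bool) (h : α → β) :
    ∀ (l : List α) (acc : List α),
      (l.map h).foldl (fun a x => PySem.List.insertBy before x a) (acc.map h)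
        = (l.foldl (fun a x => PySem.List.insertBy (fun p q => before (h p) (h q)) x a) acc).map h := by
  intro l
  induction l with
  | nil => intro acc; rfl
  | cons y ys ih =>
    intro acc
    rw [List.map_cons, List.foldl_cons, List.foldl_cons, pv_insertBy_map before h acc y, ih]

-- sorting a mapped list by keys that factor through the map
theorem pv_sorted2_map {α β κ₁ κ₂ : Type} [LT κ₁] [DecidableLT κ₁] [LT κ₂] [DecidableLT κ₂]
    (h : α → β) (k1 : β → κ₁) (k2 : β → κ₂) (l : List α) :
    PySem.List.sorted2 (l.map h) k1 k2 false
      = (PySem.List.sorted2 l (fun x => k1 (h x)) (fun x => k2 (h x)) false).map h := by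
  have := pv_foldl_insertBy_map
    (fun a b => decide (k1 a < k1 b) || (!decide (k1 b < k1 a) && decide (k2 a < k2 b))) h l []
  simpa [PySem.List.sorted2] using this

-- the two port bodies agree for every token list and table
theorem pv_core' (toks : List String) (rtp : List (String × String × String × String)) :
    (if ((toks.map PySem.Str.strip).filter (fun r => r != "")).isEmpty || rtp.isEmpty then "" else
      if ((((toks.map PySem.Str.strip).filter (fun r => r != "")).foldl (pvStepA rtp) PySem.Dict.empty).items).isEmpty then "" else
      PySem.Str.join "\n" ((PySem.List.sorted2 (((toks.map PySem.Str.strip).filter (fun r => r != "")).foldl (pvStepA rtp) PySem.Dict.empty).items (fun it => it.1.1) (fun it => it.1.2)).map (fun it => pvLineA it.1.1 it.1.2 it.2)))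
    = (if (toks.filterMap (pvMatchB rtp)).isEmpty then "" else
      PySem.Str.join "\n" (pvEmitB (PySem.List.sorted2 (toks.filterMap (pvMatchB rtp)) (fun t => t.1) (fun t => t.2.1)))) := by
  rw [pv_parse]
  set refs := (toks.map PySem.Str.strip).filter (fun r => r != "") with hrefs
  set ms := refs.filterMap (fun r => (PySem.Dict.mk rtp).get? (PySem.Str.lower r)) with hms
  rw [pv_foldA, ← hms, pv_items_fold]
  cases hb : (refs.isEmpty || rtp.isEmpty) with
  | true =>
    simp only [hb, if_pos]
    have hms0 : ms = [] := by
      rcases Bool.or_eq_true_iff.mp hb with h | h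
      · rw [hms, List.isEmpty_iff.mp h]; rfl
      · rw [hms]
        refine List.filterMap_eq_nil_iff.mpr (fun r _ => ?_)
        rw [List.isEmpty_iff.mp h]
        simp [PySem.Dict.get?]
    rw [if_pos (by simp [hms0])]
  | false =>
    simp only [hb, Bool.false_eq_true, if_false]
    cases hmsnil : ms.isEmpty with
    | true =>
      rw [List.isEmpty_iff.mp hmsnil]
      simp [pvGks]
    | false =>
      obtain ⟨m, hm⟩ := List.exists_mem_of_ne_nil ms (by
        intro h; rw [h] at hmsnil; exact Bool.true_eq_false.mp hmsnil)
      have hne1 : ((pvGks ms).map (fun gk => (gk, pvF ms gk))).isEmpty = false := by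
        have hmem : pvKf m ∈ pvGks ms := by
          rw [pvGks, PySem.Set.mem_ofList]
          exact List.mem_map_of_mem hm
        cases hg : pvGks ms with
        | nil => rw [hg] at hmem; cases hmem
        | cons a b => simp
      rw [hne1]
      simp only [Bool.false_eq_true, if_false]
      -- A's side: sort the (key, group) pairs by key components
      rw [pv_sorted2_map (fun gk => (gk, pvF ms gk)) (fun it => it.1.1) (fun it => it.1.2) (pvGks ms)]
      rw [List.map_map]
      -- B's side: the stable sort is the groups in sorted-key order, then emit per run
      rw [pv_sorted_flat ms]
      rw [pv_emit_flat (pvG ms) (pvSK ms) (pv_sk_pairwise ms)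
        (fun gk _ t ht => beq_iff_eq.mp (List.mem_filter.mp ht).2)
        (fun gk hgk => by
          rcases List.mem_map.mp ((pv_mem_sk ms gk).mp hgk) with ⟨t, ht, hkt⟩
          exact List.ne_nil_of_mem (List.mem_filter.mpr ⟨ht, beq_iff_eq.mpr hkt⟩))]
      rfl

-- the two port bodies agree on every input
theorem pv_core (e18 c20 : String) (rtp : List (String × String × String × String)) :
    build_component_action_lines_py e18 c20 rtp
      = build_component_action_lines_py_alt e18 c20 rtp := by
  unfold build_component_action_lines_py build_component_action_lines_py_alt
  exact pv_core'
    ((PySem.Str.split? (PySem.Str.replace (PySem.Str.replace (e18 ++ "," ++ c20) "\n" " ") "\r" " ") ",").getD []) rtp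

-- ===== VERDICT (by name: the statement is the Claim_ definition above) =====
theorem build_component_action_lines_py_spec : Claim_equal_build_component_action_lines_py := by
  intro e18 c20 ref_to_part _hdom _hpre
  unfold Spec_build_component_action_lines_py
  exact pv_core e18 c20 ref_to_part
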